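-- pv_equiv track=rewrite | github.com/Michael14567/Signal | mian.py | build_trellis_by_parity_check_matrix
-- ===== SOURCE A (Python) =====
-- def xor_vectors(a, b):
--     return tuple(x ^ y for x, y in zip(a, b))
--
-- def multiply_bit_vector(bit, vector):
--     if bit == 0:
--         return tuple(0 for _ in vector)
--
--     return tuple(vector)
--
-- def build_trellis_by_parity_check_matrix(H):
--     r = len(H)
--     n = len(H[0])
--
--     columns = [
--         tuple(H[row][column] for row in range(r))
--         for column in range(n)
--     ]
--
--     zero_state = tuple(0 for _ in range(r))
--
--     forward = [set() for _ in range(n + 1)]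
--     forward[0].add(zero_state)
--
--     for level in range(n):
--         for state in forward[level]:
--             for bit in [0, 1]:
--                 next_state = xor_vectors(
--                     state,
--                     multiply_bit_vector(bit, columns[level])
--                 )
--                 forward[level + 1].add(next_state)
--
--     backward = [set() for _ in range(n + 1)]
--     backward[n].add(zero_state)
--
--     for level in range(n - 1, -1, -1):
--         for next_state in backward[level + 1]:
--             for bit in [0, 1]:
--                 previous_state = xor_vectors(
--                     next_state,
--                     multiply_bit_vector(bit, columns[level])
--                 )
--                 backward[level].add(previous_state)
--
--     valid_states = [
--         sorted(forward[level] & backward[level])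
--         for level in range(n + 1)
--     ]
--
--     state_maps = []
--
--     for level, states in enumerate(valid_states):
--         state_map = {
--             state: f"S{level}_{index}"
--             for index, state in enumerate(states)
--         }
--         state_maps.append(state_map)
--
--     states_by_level = []
--
--     for level, states in enumerate(valid_states):
--         states_by_level.append([
--             f"{state_maps[level][state]}={state}"
--             for state in states
--         ])
--
--     edges = []
--
--     for level in range(n):
--         edge_set = set()
--
--         for state in valid_states[level]:
--             for bit in [0, 1]:
--                 next_state = xor_vectors(
--                     state,
--                     multiply_bit_vector(bit, columns[level])
--                 )
--
--                 if next_state in state_maps[level + 1]: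
--                     source = state_maps[level][state]
--                     target = state_maps[level + 1][next_state]
--                     edge_set.add((source, target, bit))
--
--         edges.append(sorted(edge_set))
--
--     return states_by_level, edges
-- ===== SOURCE B (Python) =====
-- def xor_vectors(a, b):
--     return tuple(x ^ y for x, y in zip(a, b))
--
--
-- def state_label(level, index):
--     return f"S{level}_{index}"
--
--
-- def build_trellis_by_parity_check_matrix(H):
--     r = len(H)
--     n = len(H[0])
--
--     columns = [tuple(H[row][column] for row in range(r)) for column in range(n)]
--     zero_state = (0,) * r
--
--     # forward pass: reachable[level+1] = reachable[level] | reachable[level] ^ column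
--     forward = [{zero_state}]
--     for col in columns:
--         prev = forward[-1]
--         forward.append(prev | {xor_vectors(s, col) for s in prev})
--
--     # backward prune instead of a full backward expansion: a forward-reachable
--     # state is valid iff one of its two successors is valid at the next level.
--     valid = [None] * (n + 1)
--     valid[n] = sorted(forward[n] & {zero_state})
--     for level in range(n - 1, -1, -1):
--         nxt = set(valid[level + 1])
--         col = columns[level]
--         valid[level] = sorted(
--             s for s in forward[level]
--             if s in nxt or xor_vectors(s, col) in nxt
--         )
--
--     states_by_level = [
--         [f"{state_label(level, i)}={s}" for i, s in enumerate(states)]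
--         for level, states in enumerate(valid)
--     ]
--
--     edges = []
--     for level in range(n):
--         col = columns[level]
--         index_of = {s: j for j, s in enumerate(valid[level + 1])}
--         edge_set = set()
--         for i, s in enumerate(valid[level]):
--             for bit in (0, 1):
--                 t = xor_vectors(s, col) if bit else s
--                 j = index_of.get(t)
--                 if j is not None:
--                     edge_set.add((state_label(level, i), state_label(level + 1, j), bit))
--         edges.append(sorted(edge_set))
--
--     return states_by_level, edges
-- ===== Notes on version B (the rewrite author's own statement) =====
-- stated objective: alternative
-- what changed: B drops A's full backward set expansion: it runs one forward reachability pass (prev | prev^column, no per-bit helper calls) and then prunes backward over the forward sets (a state is valid iff one of its two successors is valid at the next level), instead of A's two full forward/backward expansions intersected per level; names and edges are built from enumerated indices of the sorted valid lists instead of A's name dictionaries.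
-- outside the precondition, e.g. on build_trellis_by_parity_check_matrix([]): A raises IndexError, B raises IndexError; on build_trellis_by_parity_check_matrix([[1, 0], [1]]): A raises IndexError, B raises IndexError
import Mathlib
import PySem

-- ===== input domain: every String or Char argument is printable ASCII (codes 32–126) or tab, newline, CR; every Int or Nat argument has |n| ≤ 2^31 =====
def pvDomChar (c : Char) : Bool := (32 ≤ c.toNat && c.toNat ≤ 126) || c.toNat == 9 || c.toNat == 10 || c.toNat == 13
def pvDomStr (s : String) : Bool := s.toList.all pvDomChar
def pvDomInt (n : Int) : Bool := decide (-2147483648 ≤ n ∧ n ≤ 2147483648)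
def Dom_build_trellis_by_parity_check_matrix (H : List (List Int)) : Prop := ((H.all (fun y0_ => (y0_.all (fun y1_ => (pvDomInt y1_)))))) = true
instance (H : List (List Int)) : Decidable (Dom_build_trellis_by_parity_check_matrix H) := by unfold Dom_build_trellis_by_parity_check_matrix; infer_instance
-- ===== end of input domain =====

-- B replaces A's full backward-set expansion by a backward PRUNE of the forward sets
-- (a forward state is valid iff one of its two successors is valid at the next level):
-- one set-expansion pass instead of two, and index-based labels instead of name dicts.

-- helpers shared by both Pythons --------------------------------------------

-- Python: xor_vectors (same helper in Source A and Source B)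
def xor_vectors (a b : List Int) : List Int :=
  (a.zip b).map (fun p => PySem.Int.bxor p.1 p.2)

-- str(t) for a tuple of ints: "(a, b)", one element: "(a,)" — exact Python tuple repr
def pvTupleRepr (xs : List Int) : String :=
  match xs with
  | [x] => PySem.Str.join "" ["(", PySem.Int.toStr x, ",)"]
  | _   => PySem.Str.join "" ["(", PySem.Str.join ", " (xs.map PySem.Int.toStr), ")"]

-- f"S{level}_{index}"
def pvName (level index : Int) : String :=
  PySem.Str.join "" ["S", PySem.Int.toStr level, "_", PySem.Int.toStr index]

-- {state: f(index) for index, state in enumerate(states)} (dict comprehension both versions build)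
def pvDictByEnum {β : Type} (f : Int → β) (xs : List (List Int)) : PySem.Dict (List Int) β :=
  (PySem.List.enumerate xs).foldl (fun d p => d.insert p.2 (f p.1)) PySem.Dict.empty

-- Python's tuple ordering on (str, str, int) sort keys, encoded as lexicographic List Int
-- (exact for the ASCII labels produced here: -1 is below every character code)
def pvStrKey (s : String) : List Int := s.toList.map (fun c => (c.toNat : Int))
def pvEdgeKey (e : String × String × Int) : List Int :=
  pvStrKey e.1 ++ [-1] ++ pvStrKey e.2.1 ++ [-1, e.2.2]

-- ===== PORT A =====

def multiply_bit_vector (bit : Int) (v : List Int) : List Int :=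
  if bit = 0 then v.map (fun _ => (0 : Int)) else v

-- A's inner double loop: 'for state in cur: for bit in [0, 1]: out.add(xor_vectors(state, multiply_bit_vector(bit, col)))'
def pvExpandA (col : List Int) (cur : PySem.Set (List Int)) : PySem.Set (List Int) :=
  cur.foldl
    (fun acc state =>
      [(0 : Int), 1].foldl
        (fun acc2 bit => PySem.Set.add acc2 (xor_vectors state (multiply_bit_vector bit col))) acc)
    PySem.Set.empty

-- 'for level in range(n): forward[level+1] = expand(forward[level])'
def pvForwardA : List (List Int) → PySem.Set (List Int) → List (PySem.Set (List Int))
  | [], s => [s]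
  | c :: cs, s => s :: pvForwardA cs (pvExpandA c s)

-- 'for level in range(n-1, -1, -1): backward[level] = expand(backward[level+1])'
def pvBackwardA : List (List Int) → PySem.Set (List Int) → List (PySem.Set (List Int))
  | [], s => [s]
  | c :: cs, s =>
      let rest := pvBackwardA cs s
      pvExpandA c (rest.headD PySem.Set.empty) :: rest

def build_trellis_by_parity_check_matrix (H : List (List Int)) :
    List (List String) × (List (List (String × String × Int))) :=
  let r := H.length
  let n := (H.headD []).length
  let columns := (List.range n).map (fun column => (List.range r).map (fun row =>
      PySem.List.pyGetD (PySem.List.pyGetD H (row : Int) []) (column : Int) 0))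
  let zero_state : List Int := List.replicate r 0
  let forward := pvForwardA columns (PySem.Set.add PySem.Set.empty zero_state)
  let backward := pvBackwardA columns (PySem.Set.add PySem.Set.empty zero_state)
  let valid_states := (List.range (n + 1)).map (fun level =>
      PySem.List.sorted
        (PySem.Set.inter (forward.getD level PySem.Set.empty) (backward.getD level PySem.Set.empty))
        (fun s => s) false)
  let state_maps := (PySem.List.enumerate valid_states).map
      (fun p => pvDictByEnum (fun index => pvName p.1 index) p.2)
  let states_by_level := (PySem.List.enumerate valid_states).map (fun p =>
      p.2.map (fun state => PySem.Str.join ""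
        [(PySem.List.pyGetD state_maps p.1 PySem.Dict.empty).getD state "", "=", pvTupleRepr state]))
  let edges := (List.range n).map (fun level =>
      PySem.List.sorted
        ((valid_states.getD level []).foldl (fun es state =>
            [(0 : Int), 1].foldl (fun es2 bit =>
              let next_state := xor_vectors state (multiply_bit_vector bit (columns.getD level []))
              if (state_maps.getD (level + 1) PySem.Dict.empty).contains next_state then
                PySem.Set.add es2
                  ((state_maps.getD level PySem.Dict.empty).getD state "",
                   (state_maps.getD (level + 1) PySem.Dict.empty).getD next_state "", bit)
              else es2) es)
          PySem.Set.empty)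
        pvEdgeKey false)
  (states_by_level, edges)

-- ===== PORT B =====

-- 'forward.append(prev | {xor_vectors(s, col) for s in prev})'
def pvStepB (col : List Int) (prev : PySem.Set (List Int)) : PySem.Set (List Int) :=
  PySem.Set.union prev (PySem.Set.ofList (prev.map (fun s => xor_vectors s col)))

def pvForwardB : List (List Int) → PySem.Set (List Int) → List (PySem.Set (List Int))
  | [], s => [s]
  | c :: cs, s => s :: pvForwardB cs (pvStepB c s)

-- 'valid[n] = sorted(forward[n] & {zero}); for level in range(n-1,-1,-1): valid[level] = sorted(filter)'
def pvPruneB (zero : List Int) : List (List Int) → List (PySem.Set (List Int)) → List (List (List Int))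
  | [], fs => [PySem.List.sorted
      (PySem.Set.inter (fs.headD PySem.Set.empty) (PySem.Set.ofList [zero])) (fun s => s) false]
  | c :: cs, fs =>
      let rest := pvPruneB zero cs fs.tail
      let nxt := PySem.Set.ofList (rest.headD [])
      PySem.List.sorted
        ((fs.headD PySem.Set.empty).filter
          (fun s => nxt.contains s || nxt.contains (xor_vectors s c)))
        (fun s => s) false :: rest

def build_trellis_by_parity_check_matrix_alt (H : List (List Int)) :
    List (List String) × (List (List (String × String × Int))) :=
  let r := H.length
  let n := (H.headD []).length
  let columns := (List.range n).map (fun column => (List.range r).map (fun row =>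
      PySem.List.pyGetD (PySem.List.pyGetD H (row : Int) []) (column : Int) 0))
  let zero_state : List Int := List.replicate r 0
  let forward := pvForwardB columns (PySem.Set.ofList [zero_state])
  let valid := pvPruneB zero_state columns forward
  let states_by_level := (PySem.List.enumerate valid).map (fun p =>
      (PySem.List.enumerate p.2).map (fun q =>
        PySem.Str.join "" [pvName p.1 q.1, "=", pvTupleRepr q.2]))
  let edges := (List.range n).map (fun level =>
      let col := columns.getD level []
      let index_of := pvDictByEnum (fun j => j) (valid.getD (level + 1) [])
      PySem.List.sorted
        ((PySem.List.enumerate (valid.getD level [])).foldl (fun es p =>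
            [(0 : Int), 1].foldl (fun es2 (bit : Int) =>
              let t := if bit ≠ 0 then xor_vectors p.2 col else p.2
              match index_of.get? t with
              | some j => PySem.Set.add es2 (pvName (level : Int) p.1, pvName ((level : Int) + 1) j, bit)
              | none => es2) es)
          (PySem.Set.empty : PySem.Set (String × String × Int)))
        pvEdgeKey false)
  (states_by_level, edges)

-- ===== PRECONDITION & SPEC =====

-- Pre_ excludes exactly the inputs on which the Python A raises:
-- H == [] (H[0] is an IndexError) and matrices whose later rows are shorter than row 0
-- (H[row][column] is an IndexError for column < len(H[0])).
def Pre_build_trellis_by_parity_check_matrix (H : List (List Int)) : Prop :=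
  H ≠ [] ∧ ∀ row ∈ H, (H.headD []).length ≤ row.length
instance (H : List (List Int)) : Decidable (Pre_build_trellis_by_parity_check_matrix H) := by
  unfold Pre_build_trellis_by_parity_check_matrix; infer_instance

def pvWitness_build_trellis_by_parity_check_matrix : List (List Int) := [[1, 0, 1], [0, 1, 1]]

def Spec_build_trellis_by_parity_check_matrix (H : List (List Int)) (out : List (List String) × (List (List (String × String × Int)))) : Prop := out = build_trellis_by_parity_check_matrix_alt H
instance (H : List (List Int)) (out : List (List String) × (List (List (String × String × Int)))) : Decidable (Spec_build_trellis_by_parity_check_matrix H out) := by unfold Spec_build_trellis_by_parity_check_matrix; infer_instance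

-- ===== CLAIM (what is proved, stated in full; the proofs are below) =====
def Claim_equal_build_trellis_by_parity_check_matrix : Prop := ∀ (H : List (List Int)), Dom_build_trellis_by_parity_check_matrix H → Pre_build_trellis_by_parity_check_matrix H → Spec_build_trellis_by_parity_check_matrix H (build_trellis_by_parity_check_matrix H)

-- ===== LEMMAS AND PROOFS =====

-- arithmetic / vector facts --------------------------------------------------

lemma pv_bxor_cancel (x c : Int) : PySem.Int.bxor (PySem.Int.bxor x c) c = x := by
  unfold PySem.Int.bxor
  rcases le_or_gt (0:Int) x with hx | hx <;> rcases le_or_gt (0:Int) c with hc | hc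
  · simp only [if_pos hx, if_pos hc, if_pos (Int.natCast_nonneg _)]
    rw [Int.toNat_natCast, Nat.xor_xor_cancel_right, Int.toNat_of_nonneg hx]
  · simp only [if_pos hx, if_neg (not_le.mpr hc)]
    have h1 : ¬ (0 : Int) ≤ -(↑(x.toNat ^^^ (-c - 1).toNat)) - 1 := by
      have := Int.natCast_nonneg (x.toNat ^^^ (-c - 1).toNat); omega
    simp only [if_neg h1]
    have h2 : -(-(↑(x.toNat ^^^ (-c - 1).toNat) : Int) - 1) - 1 = ↑(x.toNat ^^^ (-c - 1).toNat) := by ring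
    rw [h2, Int.toNat_natCast, Nat.xor_xor_cancel_right, Int.toNat_of_nonneg hx]
  · simp only [if_neg (not_le.mpr hx), if_pos hc]
    have h1 : ¬ (0 : Int) ≤ -(↑((-x - 1).toNat ^^^ c.toNat)) - 1 := by
      have := Int.natCast_nonneg ((-x - 1).toNat ^^^ c.toNat); omega
    simp only [if_neg h1]
    have h2 : -(-(↑((-x - 1).toNat ^^^ c.toNat) : Int) - 1) - 1 = ↑((-x - 1).toNat ^^^ c.toNat) := by ring
    rw [h2, Int.toNat_natCast, Nat.xor_xor_cancel_right]
    have : ((-x - 1).toNat : Int) = -x - 1 := Int.toNat_of_nonneg (by omega)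
    omega
  · simp only [if_neg (not_le.mpr hx), if_neg (not_le.mpr hc), if_pos (Int.natCast_nonneg _)]
    rw [Int.toNat_natCast, Nat.xor_xor_cancel_right]
    have : ((-x - 1).toNat : Int) = -x - 1 := Int.toNat_of_nonneg (by omega)
    omega

lemma pv_mult_length (bit : Int) (v : List Int) : (multiply_bit_vector bit v).length = v.length := by
  unfold multiply_bit_vector; split <;> simp

lemma pv_xorv_length (a b : List Int) : (xor_vectors a b).length = min a.length b.length := by
  simp [xor_vectors]

lemma pv_mult_one (v : List Int) : multiply_bit_vector 1 v = v := by
  simp [multiply_bit_vector]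

lemma pv_xorv_map_zero (a : List Int) : ∀ (c : List Int), a.length ≤ c.length →
    xor_vectors a (c.map (fun _ => (0 : Int))) = a := by
  induction a with
  | nil => intro c h; simp [xor_vectors]
  | cons x xs ih =>
    intro c h
    cases c with
    | nil => simp at h
    | cons y ys =>
      simp only [List.map, xor_vectors, List.zip_cons_cons, List.map_cons, List.cons.injEq]
      exact ⟨PySem.Int.bxor_zero x, ih ys (by simpa using h)⟩

lemma pv_xorv_mult_zero (a c : List Int) (h : a.length ≤ c.length) :
    xor_vectors a (multiply_bit_vector 0 c) = a := by
  have hm : multiply_bit_vector 0 c = c.map (fun _ => (0 : Int)) := by simp [multiply_bit_vector]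
  rw [hm]; exact pv_xorv_map_zero a c h

lemma pv_xorv_invol (a c : List Int) (h : a.length ≤ c.length) :
    xor_vectors (xor_vectors a c) c = a := by
  induction a generalizing c with
  | nil => simp [xor_vectors]
  | cons x xs ih =>
    cases c with
    | nil => simp at h
    | cons y ys =>
      simp only [xor_vectors, List.zip_cons_cons, List.map_cons, List.cons.injEq]
      exact ⟨pv_bxor_cancel x y, ih ys (by simpa using h)⟩

-- expansion-step facts --------------------------------------------------------

lemma pv_expandA_foldl_mem (c : List Int) (x : List Int) :
    ∀ (l : List (List Int)) (init : PySem.Set (List Int)),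
      x ∈ l.foldl (fun acc state =>
        [(0 : Int), 1].foldl
          (fun acc2 bit => PySem.Set.add acc2 (xor_vectors state (multiply_bit_vector bit c))) acc) init
      ↔ x ∈ init ∨ ∃ y ∈ l, x = xor_vectors y (multiply_bit_vector 0 c) ∨ x = xor_vectors y c := by
  intro l
  induction l with
  | nil => simp
  | cons z zs ih =>
    intro init
    rw [List.foldl_cons, ih]
    simp only [List.foldl_cons, List.foldl_nil, PySem.Set.mem_add, List.mem_cons]
    constructor
    · rintro (((h | h) | h) | ⟨y, hy, h⟩)
      · exact Or.inl h
      · exact Or.inr ⟨z, Or.inl rfl, Or.inl h⟩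
      · exact Or.inr ⟨z, Or.inl rfl, Or.inr (by rw [h, pv_mult_one])⟩
      · exact Or.inr ⟨y, Or.inr hy, h⟩
    · rintro (h | ⟨y, (rfl | hy), (h | h)⟩)
      · exact Or.inl (Or.inl (Or.inl h))
      · exact Or.inl (Or.inl (Or.inr h))
      · exact Or.inl (Or.inr (by rw [h, pv_mult_one]))
      · exact Or.inr ⟨y, hy, Or.inl h⟩
      · exact Or.inr ⟨y, hy, Or.inr h⟩

lemma pv_mem_expandA (c : List Int) (s : PySem.Set (List Int)) (x : List Int) :
    x ∈ pvExpandA c s ↔ ∃ y ∈ s, x = xor_vectors y (multiply_bit_vector 0 c) ∨ x = xor_vectors y c := by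
  unfold pvExpandA
  rw [pv_expandA_foldl_mem]
  simp [PySem.Set.empty]

lemma pv_expandA_foldl_nodup (c : List Int) :
    ∀ (l : List (List Int)) (init : PySem.Set (List Int)), init.Nodup →
      (l.foldl (fun acc state =>
        [(0 : Int), 1].foldl
          (fun acc2 bit => PySem.Set.add acc2 (xor_vectors state (multiply_bit_vector bit c))) acc) init).Nodup := by
  intro l
  induction l with
  | nil => intro init h; simpa
  | cons z zs ih =>
    intro init h
    rw [List.foldl_cons]
    exact ih _ (PySem.Set.nodup_add _ _ (PySem.Set.nodup_add _ _ h))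

lemma pv_nodup_expandA (c : List Int) (s : PySem.Set (List Int)) : (pvExpandA c s).Nodup := by
  unfold pvExpandA
  exact pv_expandA_foldl_nodup c s PySem.Set.empty (by simp [PySem.Set.empty])

lemma pv_len_expandA (c : List Int) (s : PySem.Set (List Int))
    (hs : ∀ y ∈ s, y.length = c.length) :
    ∀ x ∈ pvExpandA c s, x.length = c.length := by
  intro x hx
  rcases (pv_mem_expandA c s x).mp hx with ⟨y, hy, h | h⟩ <;>
    rw [h, pv_xorv_length] <;> simp [pv_mult_length, hs y hy]

lemma pv_mem_expandA' (c : List Int) (s : PySem.Set (List Int))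
    (hs : ∀ y ∈ s, y.length = c.length) (x : List Int) :
    x ∈ pvExpandA c s ↔ x ∈ s ∨ ∃ y ∈ s, x = xor_vectors y c := by
  rw [pv_mem_expandA]
  constructor
  · rintro ⟨y, hy, h | h⟩
    · rw [h, pv_xorv_mult_zero y c (le_of_eq (hs y hy))]; exact Or.inl hy
    · exact Or.inr ⟨y, hy, h⟩
  · rintro (hx | ⟨y, hy, h⟩)
    · exact ⟨x, hx, Or.inl (pv_xorv_mult_zero x c (le_of_eq (hs x hx))).symm⟩
    · exact ⟨y, hy, Or.inr h⟩

lemma pv_mem_expandA_flip (c : List Int) (b : PySem.Set (List Int))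
    (hb : ∀ y ∈ b, y.length = c.length) (x : List Int) (hx : x.length = c.length) :
    x ∈ pvExpandA c b ↔ x ∈ b ∨ xor_vectors x c ∈ b := by
  rw [pv_mem_expandA' c b hb]
  constructor
  · rintro (h | ⟨y, hy, rfl⟩)
    · exact Or.inl h
    · exact Or.inr (by rw [pv_xorv_invol y c (le_of_eq (hb y hy))]; exact hy)
  · rintro (h | h)
    · exact Or.inl h
    · exact Or.inr ⟨xor_vectors x c, h, (pv_xorv_invol x c (le_of_eq hx)).symm⟩

lemma pv_mem_stepB (c : List Int) (s : PySem.Set (List Int)) (x : List Int) :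
    x ∈ pvStepB c s ↔ x ∈ s ∨ ∃ y ∈ s, x = xor_vectors y c := by
  unfold pvStepB
  rw [PySem.Set.mem_union, PySem.Set.mem_ofList]
  simp only [List.mem_map]
  constructor
  · rintro (h | ⟨y, hy, rfl⟩)
    · exact Or.inl h
    · exact Or.inr ⟨y, hy, rfl⟩
  · rintro (h | ⟨y, hy, rfl⟩)
    · exact Or.inl h
    · exact Or.inr ⟨y, hy, rfl⟩

lemma pv_nodup_stepB (c : List Int) (s : PySem.Set (List Int)) (h : s.Nodup) :
    (pvStepB c s).Nodup := by
  exact PySem.Set.nodup_union _ _ h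

-- forward / backward list invariants ------------------------------------------

lemma pv_headD_mem {α : Type} (l : List α) (d : α) (h : l ≠ []) : l.headD d ∈ l := by
  cases l with
  | nil => exact absurd rfl h
  | cons a t => simp

lemma pv_forwardA_inv (r : Nat) :
    ∀ (cs : List (List Int)) (s : PySem.Set (List Int)),
      (∀ c ∈ cs, c.length = r) → (∀ y ∈ s, y.length = r) → s.Nodup →
      ∀ S ∈ pvForwardA cs s, (∀ y ∈ S, y.length = r) ∧ S.Nodup := by
  intro cs
  induction cs with
  | nil =>
    intro s _ hs hnd S hS
    simp only [pvForwardA, List.mem_singleton] at hS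
    exact hS ▸ ⟨hs, hnd⟩
  | cons c cs ih =>
    intro s hc hs hnd S hS
    have hcr : c.length = r := hc c (List.mem_cons_self ..)
    simp only [pvForwardA, List.mem_cons] at hS
    rcases hS with rfl | hS
    · exact ⟨hs, hnd⟩
    · refine ih (pvExpandA c s) (fun d hd => hc d (List.mem_cons_of_mem _ hd)) ?_ (pv_nodup_expandA c s) S hS
      intro y hy
      rw [← hcr] at hs ⊢
      exact pv_len_expandA c s hs y hy

lemma pv_backwardA_ne_nil (cs : List (List Int)) (s : PySem.Set (List Int)) :
    pvBackwardA cs s ≠ [] := by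
  cases cs <;> simp [pvBackwardA]

lemma pv_backwardA_inv (r : Nat) :
    ∀ (cs : List (List Int)) (s : PySem.Set (List Int)),
      (∀ c ∈ cs, c.length = r) → (∀ y ∈ s, y.length = r) →
      ∀ S ∈ pvBackwardA cs s, (∀ y ∈ S, y.length = r) := by
  intro cs
  induction cs with
  | nil =>
    intro s _ hs S hS
    simp only [pvBackwardA, List.mem_singleton] at hS
    exact hS ▸ hs
  | cons c cs ih =>
    intro s hc hs S hS
    have hcr : c.length = r := hc c (List.mem_cons_self ..)
    have htail := ih s (fun d hd => hc d (List.mem_cons_of_mem _ hd)) hs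
    simp only [pvBackwardA, List.mem_cons] at hS
    rcases hS with rfl | hS
    · have hhead : (pvBackwardA cs s).headD PySem.Set.empty ∈ pvBackwardA cs s :=
        pv_headD_mem _ _ (pv_backwardA_ne_nil cs s)
      intro y hy
      rw [← hcr] at htail ⊢
      exact pv_len_expandA c _ (htail _ hhead) y hy
    · exact htail S hS

lemma pv_forwardA_head (cs : List (List Int)) (s : PySem.Set (List Int)) :
    (pvForwardA cs s).getD 0 PySem.Set.empty = s := by cases cs <;> rfl

lemma pv_backwardA_getD_head (cs : List (List Int)) (s : PySem.Set (List Int)) :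
    (pvBackwardA cs s).getD 0 PySem.Set.empty = (pvBackwardA cs s).headD PySem.Set.empty := by
  cases cs <;> rfl

lemma pv_sortedEq (u v : List (List Int)) (hu : u.Nodup) (hv : v.Nodup)
    (hmem : ∀ x, x ∈ u ↔ x ∈ v) :
    PySem.List.sorted u (fun x => x) false = PySem.List.sorted v (fun x => x) false := by
  have hd : (fun (a b : List Int) => a.decidableLT b) = (LinearOrder.toDecidableLT : DecidableLT (List Int)) := by
    funext a b; exact Subsingleton.elim _ _
  have h := PySem.List.sorted_eq_sorted_of_perm u v (fun x => x) (fun _ _ h => h)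
    ((List.perm_ext_iff_of_nodup hu hv).mpr hmem)
  rw [hd]
  exact h

-- the central lemma: A's sorted(forward ∩ backward) per level equals B's backward prune

lemma pv_valid_eq (r : Nat) :
    ∀ (cs : List (List Int)) (s t : PySem.Set (List Int)),
      (∀ c ∈ cs, c.length = r) → (∀ y ∈ s, y.length = r) → s.Nodup → t.Nodup →
      (∀ x, x ∈ s ↔ x ∈ t) →
      (List.range (cs.length + 1)).map (fun l =>
          PySem.List.sorted
            (PySem.Set.inter ((pvForwardA cs s).getD l PySem.Set.empty)
              ((pvBackwardA cs (PySem.Set.add PySem.Set.empty (List.replicate r 0))).getD l PySem.Set.empty))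
            (fun x => x) false)
        = pvPruneB (List.replicate r 0) cs (pvForwardB cs t) := by
  intro cs
  induction cs with
  | nil =>
    intro s t _ hs hnds hndt hmem
    simp only [pvForwardA, pvBackwardA, pvForwardB, pvPruneB, List.length_nil, Nat.zero_add,
      List.range_one, List.map_cons, List.map_nil, List.headD_cons, List.getD_cons_zero]
    congr 1
    refine pv_sortedEq _ _ (PySem.Set.nodup_inter _ _ hnds) (PySem.Set.nodup_inter _ _ hndt) ?_
    intro x
    rw [PySem.Set.mem_inter, PySem.Set.mem_inter, hmem]
    exact Iff.rfl
  | cons c cs ih =>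
    intro s t hc hs hnds hndt hmem
    have hcr : c.length = r := hc c (List.mem_cons_self ..)
    have hc' : ∀ d ∈ cs, d.length = r := fun d hd => hc d (List.mem_cons_of_mem _ hd)
    have hsc : ∀ y ∈ s, y.length = c.length := fun y hy => (hs y hy).trans hcr.symm
    have hs' : ∀ y ∈ pvExpandA c s, y.length = r := fun y hy =>
      (pv_len_expandA c s hsc y hy).trans hcr
    have hmem' : ∀ x, x ∈ pvExpandA c s ↔ x ∈ pvStepB c t := by
      intro x
      rw [pv_mem_expandA' c s hsc, pv_mem_stepB]
      constructor
      · rintro (h | ⟨y, hy, h⟩)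
        · exact Or.inl ((hmem x).mp h)
        · exact Or.inr ⟨y, (hmem y).mp hy, h⟩
      · rintro (h | ⟨y, hy, h⟩)
        · exact Or.inl ((hmem x).mpr h)
        · exact Or.inr ⟨y, (hmem y).mpr hy, h⟩
    have IH := ih (pvExpandA c s) (pvStepB c t) hc' hs' (pv_nodup_expandA c s)
      (pv_nodup_stepB c t hndt) hmem'
    -- shorthands
    set z : List Int := List.replicate r 0 with hz
    set z0 := PySem.Set.add PySem.Set.empty z with hz0
    set bh := (pvBackwardA cs z0).headD PySem.Set.empty with hbh
    have hz0l : ∀ y ∈ z0, y.length = r := by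
      intro y hy
      have : z0 = [z] := rfl
      rw [this, List.mem_singleton] at hy
      simp [hy, hz]
    have hbhl : ∀ y ∈ bh, y.length = c.length := by
      intro y hy
      refine ((pv_backwardA_inv r cs z0 hc' hz0l) bh ?_ y hy).trans hcr.symm
      exact pv_headD_mem _ _ (pv_backwardA_ne_nil cs z0)
    -- structure of both sides
    have hFB : pvForwardB (c :: cs) t = t :: pvForwardB cs (pvStepB c t) := rfl
    have hPr : pvPruneB z (c :: cs) (t :: pvForwardB cs (pvStepB c t))
        = PySem.List.sorted
            ((t.filter (fun x =>
              (PySem.Set.ofList ((pvPruneB z cs (pvForwardB cs (pvStepB c t))).headD [])).contains x ||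
              (PySem.Set.ofList ((pvPruneB z cs (pvForwardB cs (pvStepB c t))).headD [])).contains (xor_vectors x c))))
            (fun x => x) false :: pvPruneB z cs (pvForwardB cs (pvStepB c t)) := rfl
    rw [hFB, hPr]
    -- split the range map
    rw [show (c :: cs).length + 1 = (cs.length + 1) + 1 from rfl, List.range_succ_eq_map,
      List.map_cons, List.map_map]
    congr 1
    -- head
    · have hrest_head : (pvPruneB z cs (pvForwardB cs (pvStepB c t))).headD []
          = PySem.List.sorted (PySem.Set.inter (pvExpandA c s) bh) (fun x => x) false := by
        rw [← IH, List.range_succ_eq_map, List.map_cons, List.headD_cons,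
          pv_forwardA_head, pv_backwardA_getD_head]
      have hnxt : ∀ x, x ∈ PySem.Set.ofList ((pvPruneB z cs (pvForwardB cs (pvStepB c t))).headD [])
          ↔ x ∈ pvExpandA c s ∧ x ∈ bh := by
        intro x
        rw [hrest_head, PySem.Set.mem_ofList, PySem.List.mem_sorted, PySem.Set.mem_inter]
      have hA0 : (pvForwardA (c :: cs) s).getD 0 PySem.Set.empty = s := rfl
      have hB0 : (pvBackwardA (c :: cs) z0).getD 0 PySem.Set.empty = pvExpandA c bh := rfl
      rw [hA0, hB0]
      refine pv_sortedEq _ _ (PySem.Set.nodup_inter _ _ hnds) (List.Nodup.filter _ hndt) ?_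
      intro x
      rw [PySem.Set.mem_inter, List.mem_filter]
      constructor
      · rintro ⟨hxs, hxe⟩
        have hxr : x.length = c.length := hsc x hxs
        rw [pv_mem_expandA_flip c bh hbhl x hxr] at hxe
        refine ⟨(hmem x).mp hxs, ?_⟩
        rw [Bool.or_eq_true, PySem.Set.contains_iff, PySem.Set.contains_iff, hnxt, hnxt]
        rcases hxe with h | h
        · exact Or.inl ⟨(pv_mem_expandA' c s hsc x).mpr (Or.inl hxs), h⟩
        · exact Or.inr ⟨(pv_mem_expandA' c s hsc (xor_vectors x c)).mpr (Or.inr ⟨x, hxs, rfl⟩), h⟩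
      · rintro ⟨hxt, hp⟩
        have hxs : x ∈ s := (hmem x).mpr hxt
        have hxr : x.length = c.length := hsc x hxs
        rw [Bool.or_eq_true, PySem.Set.contains_iff, PySem.Set.contains_iff, hnxt, hnxt] at hp
        refine ⟨hxs, ?_⟩
        rw [pv_mem_expandA_flip c bh hbhl x hxr]
        rcases hp with ⟨_, h⟩ | ⟨_, h⟩
        · exact Or.inl h
        · exact Or.inr h


-- facts about A's list of sorted valid states ---------------------------------

lemma pv_validA_facts (r : Nat) (cs : List (List Int)) (s : PySem.Set (List Int))
    (hc : ∀ c ∈ cs, c.length = r) (hs : ∀ y ∈ s, y.length = r) (hnd : s.Nodup) :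
    ∀ L ∈ (List.range (cs.length + 1)).map (fun l =>
        PySem.List.sorted
          (PySem.Set.inter ((pvForwardA cs s).getD l PySem.Set.empty)
            ((pvBackwardA cs (PySem.Set.add PySem.Set.empty (List.replicate r 0))).getD l PySem.Set.empty))
          (fun x => x) false),
      L.Nodup ∧ ∀ y ∈ L, y.length = r := by
  intro L hL
  simp only [List.mem_map, List.mem_range] at hL
  obtain ⟨l, _, rfl⟩ := hL
  have hF : (∀ y ∈ (pvForwardA cs s).getD l PySem.Set.empty, y.length = r) ∧
      ((pvForwardA cs s).getD l PySem.Set.empty).Nodup := by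
    by_cases hl : l < (pvForwardA cs s).length
    · rw [List.getD_eq_getElem _ _ hl]
      exact pv_forwardA_inv r cs s hc hs hnd _ (List.getElem_mem hl)
    · rw [List.getD_eq_default _ _ (le_of_not_gt hl)]
      exact ⟨by simp [PySem.Set.empty], by simp [PySem.Set.empty]⟩
  have hint : (PySem.Set.inter ((pvForwardA cs s).getD l PySem.Set.empty)
      ((pvBackwardA cs (PySem.Set.add PySem.Set.empty (List.replicate r 0))).getD l PySem.Set.empty)).Nodup :=
    PySem.Set.nodup_inter _ _ hF.2
  constructor
  · exact ((PySem.List.sorted_perm _ _ _).nodup_iff).mpr hint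
  · intro y hy
    rw [PySem.List.mem_sorted, PySem.Set.mem_inter] at hy
    exact hF.1 y hy.1

-- dictionary-by-enumeration facts ----------------------------------------------

lemma pv_dictByEnum_get?_aux {β : Type} (f : Int → β) :
    ∀ (xs : List (List Int)) (st : Int) (d : PySem.Dict (List Int) β), xs.Nodup →
      ∀ v, ((PySem.List.enumerate xs st).foldl (fun d p => d.insert p.2 (f p.1)) d).get? v
        = match PySem.List.index? xs v with
          | some i => some (f (st + i))
          | none => d.get? v := by
  intro xs
  induction xs with
  | nil =>
    intro st d _ v
    have : PySem.List.index? ([] : List (List Int)) v = none := rfl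
    rw [this]
    rfl
  | cons x xs ih =>
    intro st d hnd v
    rw [PySem.List.enumerate_cons, List.foldl_cons]
    have hnd' : xs.Nodup := (List.nodup_cons.mp hnd).2
    have hx : x ∉ xs := (List.nodup_cons.mp hnd).1
    rw [ih (st + 1) (d.insert x (f st)) hnd' v]
    by_cases hvx : x = v
    · subst hvx
      have h1 : PySem.List.index? (x :: xs) x = some 0 := PySem.List.index?_cons_self ..
      have h2 : PySem.List.index? xs x = none := (PySem.List.index?_eq_none_iff xs x).mpr hx
      rw [h1, h2]
      rw [PySem.Dict.get?_insert]
      simp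
    · have h1 : PySem.List.index? (x :: xs) v = (PySem.List.index? xs v).map (· + 1) :=
        PySem.List.index?_cons_of_ne xs hvx
      rw [h1]
      rcases hidx : PySem.List.index? xs v with _ | i
      · rw [Option.map_none, PySem.Dict.get?_insert, if_neg (fun h => hvx h.symm)]
      · rw [Option.map_some]
        show some (f (st + 1 + (i : Int))) = some (f (st + ((i : Int) + 1)))
        have he : st + 1 + (i : Int) = st + ((i : Int) + 1) := by omega
        rw [he]

lemma pv_dictByEnum_get? {β : Type} (f : Int → β) (xs : List (List Int)) (h : xs.Nodup) (v : List Int) :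
    (pvDictByEnum f xs).get? v
      = match PySem.List.index? xs v with
        | some i => some (f i)
        | none => none := by
  unfold pvDictByEnum
  rw [pv_dictByEnum_get?_aux f xs 0 PySem.Dict.empty h v]
  rcases PySem.List.index? xs v with _ | i
  · exact PySem.Dict.get?_empty v
  · simp

lemma pv_index?_getElem (xs : List (List Int)) (h : xs.Nodup) (j : Nat) (hj : j < xs.length) :
    PySem.List.index? xs xs[j] = some j := by
  rw [PySem.List.index?_eq_idxOf?]
  rw [List.idxOf?_eq_some_iff]
  exact ⟨hj, rfl, fun i hi hgi => (Nat.ne_of_lt hi) ((List.Nodup.getElem_inj_iff h).mp hgi)⟩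

-- a map over a list versus a map over its enumeration --------------------------

lemma pv_map_eq_map_enumerate {α β : Type} (xs : List α) (h : α → β) (h2 : Int × α → β)
    (H : ∀ (j : Nat) (hj : j < xs.length), h xs[j] = h2 ((j : Int), xs[j])) :
    xs.map h = (PySem.List.enumerate xs).map h2 := by
  apply List.ext_getElem
  · simp [PySem.List.length_enumerate]
  · intro j hj hj2
    rw [List.getElem_map, List.getElem_map, PySem.List.getElem_enumerate]
    simpa using H j (by simpa using hj)

-- downstream equality: states_by_level ----------------------------------------

lemma pv_states_eq (V : List (List (List Int))) (hnd : ∀ L ∈ V, L.Nodup) :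
    (PySem.List.enumerate V).map (fun p =>
        p.2.map (fun state => PySem.Str.join ""
          [(PySem.List.pyGetD ((PySem.List.enumerate V).map
              (fun q => pvDictByEnum (fun index => pvName q.1 index) q.2)) p.1 PySem.Dict.empty).getD state "",
           "=", pvTupleRepr state]))
      = (PySem.List.enumerate V).map (fun p =>
          (PySem.List.enumerate p.2).map (fun q =>
            PySem.Str.join "" [pvName p.1 q.1, "=", pvTupleRepr q.2])) := by
  apply List.map_congr_left
  intro p hp
  rw [PySem.List.mem_enumerate_iff] at hp
  obtain ⟨k, hk, rfl⟩ := hp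
  simp only [zero_add]
  have hlen : ((PySem.List.enumerate V).map
      (fun q => pvDictByEnum (fun index => pvName q.1 index) q.2)).length = V.length := by
    simp [PySem.List.length_enumerate]
  have hget : PySem.List.pyGetD ((PySem.List.enumerate V).map
      (fun q => pvDictByEnum (fun index => pvName q.1 index) q.2)) (k : Int) PySem.Dict.empty
      = pvDictByEnum (fun index => pvName (k : Int) index) V[k] := by
    rw [PySem.List.pyGetD_natCast, List.getD_eq_getElem _ _ (by omega), List.getElem_map,
      PySem.List.getElem_enumerate]
    simp only [zero_add]
  rw [hget]
  refine pv_map_eq_map_enumerate V[k] _ _ ?_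
  intro j hj
  have hnodk : V[k].Nodup := hnd V[k] (List.getElem_mem hk)
  have hgd : (pvDictByEnum (fun index => pvName (k : Int) index) V[k]).getD V[k][j] ""
      = pvName (k : Int) (j : Int) := by
    have := pv_dictByEnum_get? (fun index => pvName (k : Int) index) V[k] hnodk V[k][j]
    rw [pv_index?_getElem V[k] hnodk j hj] at this
    simp only [PySem.Dict.getD, this]
    rfl
  rw [hgd]

-- downstream equality: edges ----------------------------------------------------

lemma pv_edges_eq (r n : Nat) (cols : List (List Int)) (V : List (List (List Int)))
    (hcl : cols.length = n) (hcr : ∀ c ∈ cols, c.length = r)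
    (hVl : V.length = n + 1) (hV : ∀ L ∈ V, L.Nodup ∧ ∀ y ∈ L, y.length = r) :
    (List.range n).map (fun level =>
        PySem.List.sorted
          ((V.getD level []).foldl (fun es state =>
              [(0 : Int), 1].foldl (fun es2 bit =>
                if (((PySem.List.enumerate V).map
                      (fun p => pvDictByEnum (fun index => pvName p.1 index) p.2)).getD (level + 1) PySem.Dict.empty).contains
                      (xor_vectors state (multiply_bit_vector bit (cols.getD level []))) then
                  PySem.Set.add es2
                    ((((PySem.List.enumerate V).map
                        (fun p => pvDictByEnum (fun index => pvName p.1 index) p.2)).getD level PySem.Dict.empty).getD state "",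
                     (((PySem.List.enumerate V).map
                        (fun p => pvDictByEnum (fun index => pvName p.1 index) p.2)).getD (level + 1) PySem.Dict.empty).getD
                        (xor_vectors state (multiply_bit_vector bit (cols.getD level []))) "", bit)
                else es2) es)
            PySem.Set.empty)
          pvEdgeKey false)
      = (List.range n).map (fun level =>
          PySem.List.sorted
            ((PySem.List.enumerate (V.getD level [])).foldl (fun es p =>
                [(0 : Int), 1].foldl (fun es2 (bit : Int) =>
                  match (pvDictByEnum (fun j => j) (V.getD (level + 1) [])).get?
                      (if bit ≠ 0 then xor_vectors p.2 (cols.getD level []) else p.2) with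
                  | some j => PySem.Set.add es2 (pvName (level : Int) p.1, pvName ((level : Int) + 1) j, bit)
                  | none => es2) es)
              (PySem.Set.empty : PySem.Set (String × String × Int)))
            pvEdgeKey false) := by
  apply List.map_congr_left
  intro level hlev
  rw [List.mem_range] at hlev
  have hVlev : level < V.length := by omega
  have hVlev1 : level + 1 < V.length := by omega
  have hclev : level < cols.length := by omega
  have hgl : V.getD level [] = V[level] := List.getD_eq_getElem _ _ hVlev
  have hgl1 : V.getD (level + 1) [] = V[level + 1] := List.getD_eq_getElem _ _ hVlev1
  have hgc : cols.getD level [] = cols[level] := List.getD_eq_getElem _ _ hclev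
  have hmaps : ∀ (m : Nat) (hm : m < V.length),
      ((PySem.List.enumerate V).map
        (fun p => pvDictByEnum (fun index => pvName p.1 index) p.2)).getD m PySem.Dict.empty
      = pvDictByEnum (fun index => pvName (m : Int) index) (V[m]'hm) := by
    intro m hm
    rw [List.getD_eq_getElem _ _ (by simpa [PySem.List.length_enumerate] using hm), List.getElem_map,
      PySem.List.getElem_enumerate]
    simp only [zero_add]
  have hnodL : V[level].Nodup := (hV _ (List.getElem_mem hVlev)).1
  have hlenL : ∀ y ∈ V[level], y.length = r := (hV _ (List.getElem_mem hVlev)).2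
  have hnod1 : V[level + 1].Nodup := (hV _ (List.getElem_mem hVlev1)).1
  have hcolr : cols[level].length = r := hcr _ (List.getElem_mem hclev)
  rw [hgl, hgl1, hgc, hmaps level hVlev, hmaps (level + 1) hVlev1]
  congr 1
  have hfold : ∀ (g : PySem.Set (String × String × Int) → List Int → PySem.Set (String × String × Int))
      (init : PySem.Set (String × String × Int)),
      (V[level]).foldl g init = (PySem.List.enumerate V[level]).foldl (fun a q => g a q.2) init := by
    intro g init
    conv_lhs => rw [← PySem.List.map_snd_enumerate V[level] 0, List.foldl_map]
  rw [hfold]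
  apply PySem.List.foldl_congr_mem
  intro acc q hq
  rw [PySem.List.mem_enumerate_iff] at hq
  obtain ⟨k, hk, rfl⟩ := hq
  simp only [zero_add, List.foldl_cons, List.foldl_nil]
  have hmem : V[level][k] ∈ V[level] := List.getElem_mem hk
  have hsl : V[level][k].length ≤ cols[level].length := le_of_eq ((hlenL _ hmem).trans hcolr.symm)
  have hmz : xor_vectors V[level][k] (multiply_bit_vector 0 cols[level]) = V[level][k] :=
    pv_xorv_mult_zero _ _ hsl
  have hm1 : multiply_bit_vector 1 cols[level] = cols[level] := pv_mult_one _
  -- the per-bit step, shared reasoning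
  have hstep : ∀ (acc2 : PySem.Set (String × String × Int)) (bit : Int) (v : List Int),
      (if (pvDictByEnum (fun index => pvName ((level + 1 : Nat) : Int) index) V[level + 1]).contains v then
        PySem.Set.add acc2
          ((pvDictByEnum (fun index => pvName ((level : Nat) : Int) index) V[level]).getD V[level][k] "",
           (pvDictByEnum (fun index => pvName ((level + 1 : Nat) : Int) index) V[level + 1]).getD v "", bit)
      else acc2)
      = (match (pvDictByEnum (fun j => j) V[level + 1]).get? v with
        | some j => PySem.Set.add acc2 (pvName (level : Int) (k : Int), pvName ((level : Int) + 1) j, bit)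
        | none => acc2) := by
    intro acc2 bit v
    have hcont : (pvDictByEnum (fun index => pvName ((level + 1 : Nat) : Int) index) V[level + 1]).contains v
        = ((pvDictByEnum (fun j => j) V[level + 1]).get? v).isSome := by
      rw [PySem.Dict.contains_eq_isSome_get?, pv_dictByEnum_get? _ _ hnod1, pv_dictByEnum_get? _ _ hnod1]
      rcases PySem.List.index? V[level + 1] v with _ | j <;> rfl
    have hmyname : (pvDictByEnum (fun index => pvName ((level : Nat) : Int) index) V[level]).getD V[level][k] ""
        = pvName (level : Int) (k : Int) := by
      have := pv_dictByEnum_get? (fun index => pvName ((level : Nat) : Int) index) V[level] hnodL V[level][k]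
      rw [pv_index?_getElem V[level] hnodL k hk] at this
      simp only [PySem.Dict.getD, this]
      rfl
    rcases hidx : PySem.List.index? V[level + 1] v with _ | j
    · have h1 : (pvDictByEnum (fun j => j) V[level + 1]).get? v = none := by
        rw [pv_dictByEnum_get? _ _ hnod1, hidx]
      have hcf : (pvDictByEnum (fun index => pvName ((level + 1 : Nat) : Int) index) V[level + 1]).contains v = false := by
        rw [hcont, h1]; rfl
      rw [h1, hcf]
      rfl
    · have h1 : (pvDictByEnum (fun j => j) V[level + 1]).get? v = some (j : Int) := by
        rw [pv_dictByEnum_get? _ _ hnod1, hidx]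
      have h2 : (pvDictByEnum (fun index => pvName ((level + 1 : Nat) : Int) index) V[level + 1]).getD v ""
          = pvName ((level : Int) + 1) (j : Int) := by
        have := pv_dictByEnum_get? (fun index => pvName ((level + 1 : Nat) : Int) index) V[level + 1] hnod1 v
        rw [hidx] at this
        simp only [PySem.Dict.getD, this]
        push_cast
        rfl
      have hct : (pvDictByEnum (fun index => pvName ((level + 1 : Nat) : Int) index) V[level + 1]).contains v = true := by
        rw [hcont, h1]; rfl
      rw [h1, hct, hmyname, h2]
      rfl
  have hb0 : (if (0 : Int) ≠ 0 then xor_vectors V[level][k] cols[level] else V[level][k]) = V[level][k] := by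
    simp
  have hb1 : (if (1 : Int) ≠ 0 then xor_vectors V[level][k] cols[level] else V[level][k])
      = xor_vectors V[level][k] cols[level] := by
    simp
  rw [hmz, hm1, hb0, hb1, hstep acc 0 V[level][k],
    hstep _ 1 (xor_vectors V[level][k] cols[level])]

-- ===== VERDICT (by name: the statement is the Claim_ definition above) =====
theorem build_trellis_by_parity_check_matrix_spec : Claim_equal_build_trellis_by_parity_check_matrix := by
  intro H _ _
  unfold Spec_build_trellis_by_parity_check_matrix
  simp only [build_trellis_by_parity_check_matrix, build_trellis_by_parity_check_matrix_alt]
  set r := H.length with hr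
  set n := (H.headD []).length with hn
  set cols := (List.range n).map (fun column => (List.range r).map (fun row =>
      PySem.List.pyGetD (PySem.List.pyGetD H (row : Int) []) (column : Int) 0)) with hcols
  set z : List Int := List.replicate r 0 with hz
  have hclen : cols.length = n := by simp [hcols]
  have hcr : ∀ c ∈ cols, c.length = r := by
    intro c hc
    rw [hcols, List.mem_map] at hc
    obtain ⟨col, _, rfl⟩ := hc
    simp
  have hst : PySem.Set.add PySem.Set.empty z = PySem.Set.ofList [z] := rfl
  have hs : ∀ y ∈ PySem.Set.add PySem.Set.empty z, y.length = r := by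
    intro y hy
    have : PySem.Set.add PySem.Set.empty z = [z] := rfl
    rw [this, List.mem_singleton] at hy
    simp [hy, hz]
  have hnds : (PySem.Set.add PySem.Set.empty z).Nodup := by
    have : PySem.Set.add PySem.Set.empty z = [z] := rfl
    rw [this]; simp
  have hndt : (PySem.Set.ofList [z]).Nodup := PySem.Set.nodup_ofList _
  have hmem : ∀ x, x ∈ PySem.Set.add PySem.Set.empty z ↔ x ∈ PySem.Set.ofList [z] := by
    intro x; rw [hst]
  have hValid := pv_valid_eq r cols (PySem.Set.add PySem.Set.empty z) (PySem.Set.ofList [z])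
    hcr hs hnds hndt hmem
  have hFacts := pv_validA_facts r cols (PySem.Set.add PySem.Set.empty z) hcr hs hnds
  rw [hclen] at hValid hFacts
  rw [← hValid]
  rw [Prod.mk.injEq]
  constructor
  · exact pv_states_eq _ (fun L hL => (hFacts L hL).1)
  · exact pv_edges_eq r n cols _ hclen hcr (by simp) hFacts
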